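-- pv_equiv track=rewrite | github.com/AkumasCoffin/pluralproxy | bot/bot.py | alter_summary_fields
-- ===== SOURCE A (Python) =====
-- def alter_summary_fields(alter: dict) -> list[tuple[str, str]]:
--     """Return a short list of (label, value) pairs for embed display."""
--     fields = []
--     mapping = [
--         ("Age", "Age"), ("Gender", "Gender"), ("Pronouns", "Presentation"),
--         ("Role", "Role"), ("Sexuality", "Sexuality"),
--     ]
--     found = set()
--     for label, key in mapping:
--         if key in found:
--             continue
--         # Fields live inside group arrays (e.g. "Basic Info": [{"Age": "25"}, ...])
--         for group_name in ("Basic Info", "System Info", "Identity"):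
--             group = alter.get(group_name, [])
--             if isinstance(group, list):
--                 for field in group:
--                     if isinstance(field, dict) and key in field:
--                         val = str(field[key]).strip()
--                         if val:
--                             fields.append((label, val))
--                             found.add(key)
--                             break
--     return fields
-- ===== SOURCE B (Python) =====
-- def alter_summary_fields(alter: dict) -> list[tuple[str, str]]:
--     """Return a short list of (label, value) pairs for embed display."""
--     labels = ["Age", "Gender", "Pronouns", "Role", "Sexuality"]
--     keys = ["Age", "Gender", "Presentation", "Role", "Sexuality"]
--     # One pass per group: index[key] = first non-empty stripped value for that key.
--     indexes = []
--     for group_name in ("Basic Info", "System Info", "Identity"):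
--         group = alter.get(group_name, [])
--         idx = {}
--         if isinstance(group, list):
--             for field in group:
--                 if isinstance(field, dict):
--                     for key in keys:
--                         if key not in idx and key in field:
--                             s = str(field[key]).strip()
--                             if s:
--                                 idx[key] = s
--         indexes.append(idx)
--     # Output pass: label-major, group-minor, straight lookups.
--     return [(label, idx[key])
--             for label, key in zip(labels, keys)
--             for idx in indexes if key in idx]
-- ===== Notes on version B (the rewrite author's own statement) =====
-- stated objective: alternative
-- what changed: A scans all three groups from scratch for every (label, key) pair with an inner break; B builds, in one pass per group, an index of the first non-empty stripped value for each key, then emits the output with a flat label-major lookup pass over the three indexes.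
import Mathlib
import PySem

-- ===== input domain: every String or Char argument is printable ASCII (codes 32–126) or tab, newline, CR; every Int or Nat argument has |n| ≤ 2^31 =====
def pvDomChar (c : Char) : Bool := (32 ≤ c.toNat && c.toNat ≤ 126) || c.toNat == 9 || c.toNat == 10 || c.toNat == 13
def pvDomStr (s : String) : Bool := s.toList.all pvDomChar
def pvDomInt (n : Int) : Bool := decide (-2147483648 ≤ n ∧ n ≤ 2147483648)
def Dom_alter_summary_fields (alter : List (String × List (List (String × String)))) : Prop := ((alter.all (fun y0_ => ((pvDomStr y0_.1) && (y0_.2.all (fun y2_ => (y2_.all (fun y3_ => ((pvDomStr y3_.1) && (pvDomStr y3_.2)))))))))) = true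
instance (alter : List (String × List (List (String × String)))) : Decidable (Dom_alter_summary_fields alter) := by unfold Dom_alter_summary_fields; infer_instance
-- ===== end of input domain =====

-- B replaces A's label-major nested rescans with one index-building pass per group followed
-- by a flat lookup pass (objective: alternative decomposition; same observable return value).

-- ===== PORT A =====
-- inner 'for field in group' loop with its break (isinstance checks are vacuous under the types)
def pvScanGroupA (label key : String) (group : List (List (String × String)))
    (fields : List (String × String)) (found : PySem.Set String) :
    List (String × String) × PySem.Set String :=
  match group with
  | [] => (fields, found)
  | field :: rest =>
    match (PySem.Dict.mk field).get? key with      -- 'key in field' + 'field[key]' (str() is identity on str)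
    | some v =>
      let val := PySem.Str.strip v
      if val ≠ "" then (fields ++ [(label, val)], PySem.Set.add found key)
      else pvScanGroupA label key rest fields found
    | none => pvScanGroupA label key rest fields found

def alter_summary_fields (alter : List (String × List (List (String × String)))) : List (String × String) :=
  let mapping : List (String × String) :=
    [("Age", "Age"), ("Gender", "Gender"), ("Pronouns", "Presentation"),
     ("Role", "Role"), ("Sexuality", "Sexuality")]
  (mapping.foldl
    (fun (st : List (String × String) × PySem.Set String) lk =>
      if PySem.Set.contains st.2 lk.2 then st
      else (["Basic Info", "System Info", "Identity"]).foldl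
        (fun st g => pvScanGroupA lk.1 lk.2 ((PySem.Dict.mk alter).getD g []) st.1 st.2) st)
    ([], PySem.Set.empty)).1

-- ===== PORT B =====
-- one field of a group updates the index: 'if key not in idx and key in field: ...'
def pvKeyStep (field : List (String × String)) (idx : PySem.Dict String String)
    (key : String) : PySem.Dict String String :=
  if idx.contains key then idx
  else
    match (PySem.Dict.mk field).get? key with   -- 'key in field' + 'field[key]'
    | some v =>
      let s := PySem.Str.strip v
      if s ≠ "" then idx.insert key s else idx
    | none => idx

def pvFieldStep (keys : List String) (idx : PySem.Dict String String)
    (field : List (String × String)) : PySem.Dict String String :=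
  keys.foldl (pvKeyStep field) idx

def alter_summary_fields_alt (alter : List (String × List (List (String × String)))) : List (String × String) :=
  let labels : List String := ["Age", "Gender", "Pronouns", "Role", "Sexuality"]
  let keys : List String := ["Age", "Gender", "Presentation", "Role", "Sexuality"]
  let indexes : List (PySem.Dict String String) :=
    (["Basic Info", "System Info", "Identity"]).map
      (fun g => ((PySem.Dict.mk alter).getD g []).foldl (pvFieldStep keys) PySem.Dict.empty)
  (labels.zip keys).flatMap
    (fun lk =>
      indexes.flatMap
        (fun idx =>
          match idx.get? lk.2 with                  -- 'if key in idx' + 'idx[key]'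
          | some v => [(lk.1, v)]
          | none => []))

-- ===== PRECONDITION & SPEC =====
def Spec_alter_summary_fields (alter : List (String × List (List (String × String)))) (out : List (String × String)) : Prop := out = alter_summary_fields_alt alter
instance (alter : List (String × List (List (String × String)))) (out : List (String × String)) : Decidable (Spec_alter_summary_fields alter out) := by unfold Spec_alter_summary_fields; infer_instance

-- ===== CLAIM (what is proved, stated in full; the proofs are below) =====
def Claim_equal_alter_summary_fields : Prop := ∀ (alter : List (String × List (List (String × String)))), Dom_alter_summary_fields alter → Spec_alter_summary_fields alter (alter_summary_fields alter)

-- ===== LEMMAS AND PROOFS =====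

-- the value A's inner scan would emit from one field
def pvFieldVal (key : String) (field : List (String × String)) : Option String :=
  match (PySem.Dict.mk field).get? key with
  | some v => if PySem.Str.strip v ≠ "" then some (PySem.Str.strip v) else none
  | none => none

-- first non-empty stripped value for 'key' in a group
def pvFirstVal (key : String) (group : List (List (String × String))) : Option String :=
  match group with
  | [] => none
  | field :: rest => (pvFieldVal key field).or (pvFirstVal key rest)

-- the pairs one (label, key) contributes, group by group
def pvEmit (alter : List (String × List (List (String × String)))) (label key : String) :
    List (String × String) :=
  (["Basic Info", "System Info", "Identity"]).flatMap
    (fun g => match pvFirstVal key ((PySem.Dict.mk alter).getD g []) with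
              | some v => [(label, v)] | none => [])

lemma pvScanGroupA_eq (label key : String) (group : List (List (String × String)))
    (fields : List (String × String)) (found : PySem.Set String) :
    pvScanGroupA label key group fields found =
      (fields ++ (match pvFirstVal key group with | some v => [(label, v)] | none => []),
       match pvFirstVal key group with | some _ => PySem.Set.add found key | none => found) := by
  induction group with
  | nil => simp [pvScanGroupA, pvFirstVal]
  | cons field rest ih =>
    simp only [pvScanGroupA, pvFirstVal, pvFieldVal]
    rcases h : (PySem.Dict.mk field).get? key with _ | v
    · simpa using ih
    · by_cases hs : PySem.Str.strip v ≠ ""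
      · simp [hs, Option.or]
      · simpa [hs, Option.or] using ih

lemma pvKeyStep_get_ne (field : List (String × String)) (idx : PySem.Dict String String)
    (k key : String) (hne : key ≠ k) :
    (pvKeyStep field idx k).get? key = idx.get? key := by
  unfold pvKeyStep
  split_ifs with hc
  · rfl
  · rcases (PySem.Dict.mk field).get? k with _ | v
    · rfl
    · simp only []
      split_ifs with hs
      · exact PySem.Dict.get?_insert_of_ne _ _ hne
      · rfl

lemma pvKeyStep_get_self (field : List (String × String)) (idx : PySem.Dict String String)
    (key : String) :
    (pvKeyStep field idx key).get? key = (idx.get? key).or (pvFieldVal key field) := by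
  unfold pvKeyStep
  have hcs := PySem.Dict.contains_eq_isSome_get? idx key
  split_ifs with hc
  · rw [hc] at hcs
    rcases h : idx.get? key with _ | w
    · rw [h] at hcs; simp at hcs
    · simp [Option.or]
  · have hcf : idx.contains key = false := by simpa using hc
    rw [hcf] at hcs
    have hidx : idx.get? key = none := Option.not_isSome_iff_eq_none.mp (by simp [← hcs])
    rcases h : (PySem.Dict.mk field).get? key with _ | v
    · simp [hidx, pvFieldVal, h, Option.or]
    · simp only []
      split_ifs with hs
      · simp [PySem.Dict.get?_insert_self, hidx, pvFieldVal, h, hs, Option.or]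
      · simp [hidx, pvFieldVal, h, hs, Option.or]

lemma pvFoldKeys_not_mem (field : List (String × String)) (keys : List String)
    (idx : PySem.Dict String String) (key : String) (h : key ∉ keys) :
    (keys.foldl (pvKeyStep field) idx).get? key = idx.get? key := by
  induction keys generalizing idx with
  | nil => rfl
  | cons k rest ih =>
    rw [List.foldl_cons, ih _ (fun hm => h (List.mem_cons_of_mem _ hm)),
      pvKeyStep_get_ne _ _ _ _ (by rintro rfl; exact h (List.mem_cons_self ..))]

lemma pvFoldKeys_get (field : List (String × String)) (keys : List String)
    (idx : PySem.Dict String String) (key : String) (hk : key ∈ keys) (hnd : keys.Nodup) :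
    (keys.foldl (pvKeyStep field) idx).get? key = (idx.get? key).or (pvFieldVal key field) := by
  induction keys generalizing idx with
  | nil => simp at hk
  | cons k rest ih =>
    rw [List.foldl_cons]
    rcases List.mem_cons.mp hk with rfl | hmem
    · rw [pvFoldKeys_not_mem _ _ _ _ (List.nodup_cons.mp hnd).1, pvKeyStep_get_self]
    · have hne : key ≠ k := by
        rintro rfl; exact (List.nodup_cons.mp hnd).1 hmem
      rw [ih _ hmem (List.nodup_cons.mp hnd).2, pvKeyStep_get_ne _ _ _ _ hne]

lemma pvBuildIdx_get (keys : List String) (group : List (List (String × String)))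
    (idx : PySem.Dict String String) (key : String) (hk : key ∈ keys) (hnd : keys.Nodup) :
    (group.foldl (pvFieldStep keys) idx).get? key = (idx.get? key).or (pvFirstVal key group) := by
  induction group generalizing idx with
  | nil => simp [pvFirstVal]
  | cons field rest ih =>
    simp only [List.foldl_cons, pvFirstVal]
    rw [ih, pvFieldStep, pvFoldKeys_get field keys idx key hk hnd, Option.or_assoc]

-- A's pass over a list of group names for one (label, key)
lemma pvScanGroups_eq (alter : List (String × List (List (String × String))))
    (label key : String) (gs : List String)
    (st : List (String × String) × PySem.Set String) :
    gs.foldl (fun st g => pvScanGroupA label key ((PySem.Dict.mk alter).getD g []) st.1 st.2) st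
    = (st.1 ++ gs.flatMap
        (fun g => match pvFirstVal key ((PySem.Dict.mk alter).getD g []) with
                  | some v => [(label, v)] | none => []),
       gs.foldl
         (fun s g => match pvFirstVal key ((PySem.Dict.mk alter).getD g []) with
                     | some _ => PySem.Set.add s key | none => s) st.2) := by
  induction gs generalizing st with
  | nil => simp
  | cons g rest ih =>
    rw [List.foldl_cons, pvScanGroupA_eq, ih]
    cases h : pvFirstVal key ((PySem.Dict.mk alter).getD g []) <;>
      simp [h, List.foldl_cons, List.flatMap_cons, List.append_assoc]

lemma pvFoundGroups (alter : List (String × List (List (String × String)))) (key : String)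
    (gs : List String) (found : PySem.Set String) (k : String) :
    PySem.Set.contains (gs.foldl
      (fun s g => match pvFirstVal key ((PySem.Dict.mk alter).getD g []) with
                  | some _ => PySem.Set.add s key | none => s) found) k = true →
    k = key ∨ PySem.Set.contains found k = true := by
  induction gs generalizing found with
  | nil => exact fun h => Or.inr h
  | cons g rest ih =>
    rw [List.foldl_cons]
    cases h : pvFirstVal key ((PySem.Dict.mk alter).getD g []) <;> simp only [h]
    · exact ih found
    · intro hk
      rcases ih _ hk with h' | h'
      · exact Or.inl h'
      · rw [PySem.Set.contains_iff, PySem.Set.mem_add] at h'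
        rcases h' with h' | h'
        · exact Or.inr (by rw [PySem.Set.contains_iff]; exact h')
        · exact Or.inl h'

-- A's whole label loop, with its 'found' bookkeeping as an invariant
def pvLoop (alter : List (String × List (List (String × String))))
    (st : List (String × String) × PySem.Set String) (mapping : List (String × String)) :
    List (String × String) × PySem.Set String :=
  mapping.foldl
    (fun (st : List (String × String) × PySem.Set String) lk =>
      if PySem.Set.contains st.2 lk.2 then st
      else (["Basic Info", "System Info", "Identity"]).foldl
        (fun st g => pvScanGroupA lk.1 lk.2 ((PySem.Dict.mk alter).getD g []) st.1 st.2) st)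
    st

lemma pvLoop_cons (alter : List (String × List (List (String × String))))
    (st : List (String × String) × PySem.Set String) (lk : String × String)
    (rest : List (String × String)) :
    pvLoop alter st (lk :: rest) =
      pvLoop alter
        (if PySem.Set.contains st.2 lk.2 then st
         else (["Basic Info", "System Info", "Identity"]).foldl
           (fun st g => pvScanGroupA lk.1 lk.2 ((PySem.Dict.mk alter).getD g []) st.1 st.2) st)
        rest := rfl

lemma pvLoopA_eq (alter : List (String × List (List (String × String))))
    (mapping : List (String × String)) (st : List (String × String) × PySem.Set String)
    (hnd : (mapping.map Prod.snd).Nodup)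
    (hst : ∀ lk ∈ mapping, PySem.Set.contains st.2 lk.2 = false) :
    (pvLoop alter st mapping).1 = st.1 ++ mapping.flatMap (fun lk => pvEmit alter lk.1 lk.2)
    ∧ ∀ k, PySem.Set.contains (pvLoop alter st mapping).2 k = true →
        k ∈ mapping.map Prod.snd ∨ PySem.Set.contains st.2 k = true := by
  induction mapping generalizing st with
  | nil => simp [pvLoop]
  | cons lk rest ih =>
    rw [List.map_cons, List.nodup_cons] at hnd
    have hc0 := hst lk (List.mem_cons_self ..)
    rw [pvLoop_cons, if_neg (show ¬(PySem.Set.contains st.2 lk.2 = true) by rw [hc0]; simp),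
      pvScanGroups_eq]
    have hst' : ∀ lk' ∈ rest, PySem.Set.contains
        ((["Basic Info", "System Info", "Identity"]).foldl
          (fun s g => match pvFirstVal lk.2 ((PySem.Dict.mk alter).getD g []) with
                      | some _ => PySem.Set.add s lk.2 | none => s) st.2) lk'.2 = false := by
      intro lk' hm
      cases hcc : PySem.Set.contains _ lk'.2
      · rfl
      · exfalso
        rcases pvFoundGroups alter lk.2 _ st.2 lk'.2 hcc with he | he
        · exact hnd.1 (he ▸ List.mem_map_of_mem hm)
        · rw [hst lk' (List.mem_cons_of_mem _ hm)] at he; exact Bool.false_ne_true he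
    obtain ⟨ih1, ih2⟩ := ih
      (st.1 ++ (["Basic Info", "System Info", "Identity"]).flatMap
        (fun g => match pvFirstVal lk.2 ((PySem.Dict.mk alter).getD g []) with
                  | some v => [(lk.1, v)] | none => []),
        (["Basic Info", "System Info", "Identity"]).foldl
          (fun s g => match pvFirstVal lk.2 ((PySem.Dict.mk alter).getD g []) with
                      | some _ => PySem.Set.add s lk.2 | none => s) st.2)
      hnd.2 hst'
    constructor
    · rw [ih1, List.flatMap_cons]
      exact List.append_assoc _ _ _
    · intro k hk
      rcases ih2 k hk with h | h
      · exact Or.inl (List.mem_cons_of_mem _ h)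
      · rcases pvFoundGroups alter lk.2 _ st.2 k h with he | he
        · exact Or.inl (he ▸ List.mem_cons_self ..)
        · exact Or.inr he

-- the per-group index of B answers pvFirstVal
lemma pvIdxGet (alter : List (String × List (List (String × String)))) (g key : String)
    (hk : key ∈ (["Age", "Gender", "Presentation", "Role", "Sexuality"] : List String)) :
    (((PySem.Dict.mk alter).getD g []).foldl
        (pvFieldStep ["Age", "Gender", "Presentation", "Role", "Sexuality"])
        PySem.Dict.empty).get? key
      = pvFirstVal key ((PySem.Dict.mk alter).getD g []) := by
  rw [pvBuildIdx_get _ _ _ _ hk (by decide)]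
  simp [PySem.Dict.get?_empty, Option.or]

-- one label's chunk of B's output pass
lemma pvChunk (alter : List (String × List (List (String × String)))) (label key : String)
    (hk : key ∈ (["Age", "Gender", "Presentation", "Role", "Sexuality"] : List String)) :
    ((["Basic Info", "System Info", "Identity"]).map
      (fun g => ((PySem.Dict.mk alter).getD g []).foldl
        (pvFieldStep ["Age", "Gender", "Presentation", "Role", "Sexuality"])
        PySem.Dict.empty)).flatMap
      (fun idx => match idx.get? key with | some v => [(label, v)] | none => [])
    = pvEmit alter label key := by
  simp only [List.map_cons, List.map_nil, List.flatMap_cons, List.flatMap_nil, pvEmit]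
  rw [pvIdxGet alter _ _ hk, pvIdxGet alter _ _ hk, pvIdxGet alter _ _ hk]

lemma pvAlt_eq (alter : List (String × List (List (String × String)))) :
    alter_summary_fields_alt alter =
      pvEmit alter "Age" "Age" ++ (pvEmit alter "Gender" "Gender" ++
      (pvEmit alter "Pronouns" "Presentation" ++ (pvEmit alter "Role" "Role" ++
      pvEmit alter "Sexuality" "Sexuality"))) := by
  show (([("Age", "Age"), ("Gender", "Gender"), ("Pronouns", "Presentation"),
      ("Role", "Role"), ("Sexuality", "Sexuality")] : List (String × String)).flatMap
    (fun lk => ((["Basic Info", "System Info", "Identity"]).map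
      (fun g => ((PySem.Dict.mk alter).getD g []).foldl
        (pvFieldStep ["Age", "Gender", "Presentation", "Role", "Sexuality"])
        PySem.Dict.empty)).flatMap
      (fun idx => match idx.get? lk.2 with | some v => [(lk.1, v)] | none => []))) = _
  simp only [List.flatMap_cons, List.flatMap_nil, List.append_nil]
  rw [pvChunk alter _ _ (by simp), pvChunk alter _ _ (by simp), pvChunk alter _ _ (by simp),
    pvChunk alter _ _ (by simp), pvChunk alter _ _ (by simp)]

-- ===== VERDICT (by name: the statement is the Claim_ definition above) =====
theorem alter_summary_fields_spec : Claim_equal_alter_summary_fields := by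
  intro alter _
  unfold Spec_alter_summary_fields
  rw [pvAlt_eq]
  have hA : alter_summary_fields alter =
      (pvLoop alter ([], PySem.Set.empty)
        [("Age", "Age"), ("Gender", "Gender"), ("Pronouns", "Presentation"),
         ("Role", "Role"), ("Sexuality", "Sexuality")]).1 := rfl
  rw [hA, (pvLoopA_eq alter _ ([], PySem.Set.empty) (by decide) (by intro lk _; rfl)).1]
  simp [List.flatMap_cons, List.flatMap_nil]
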